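-- pv_equiv track=rewrite | github.com/cutehammond772/problem-solving-archive | 백준/Platinum/16566. 카드 게임/카드 게임.py | solve
-- ===== SOURCE A (Python) =====
-- def index(A, K):
--   x, y = 0, len(A)
--
--   while x < y:
--     mid = (x + y) // 2
--
--     if A[mid] > K:
--       y = mid
--     else:
--       x = mid + 1
--
--   return x
--
-- def find(U, x):
--   if U[x] == x:
--     return U[x]
--
--   nodes = [x]
--   while U[nodes[-1]] != nodes[-1]:
--     nodes.append(U[nodes[-1]])
--
--   for node in nodes:
--     U[node] = nodes[-1]
--
--   return U[x]
--
-- def solve(M, K, nums, target):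
--   U = [x for x in range(M)]
--   result = []
--
--   for k in range(K):
--     idx = find(U, index(nums, target[k]))
--     result.append(nums[idx])
--
--     U[idx] = idx + 1
--
--   return result
-- ===== SOURCE B (Python) =====
-- def solve(M, K, nums, target):
--     # Keep the remaining cards as a list of values (nums is sorted in the
--     # problem's domain); for each target scan for the first remaining value
--     # strictly greater than it and remove it.
--     avail = list(nums)
--     result = []
--     for k in range(K):
--         t = target[k]
--         i = next(i for i, v in enumerate(avail) if v > t)
--         result.append(avail.pop(i))
--     return result
-- ===== Notes on version B (the rewrite author's own statement) =====
-- stated objective: simpler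
-- what changed: Replaces A's hand-written binary search plus path-compressed union-find over card indices by a plain remaining-cards list: for each target, scan the (sorted) remaining values for the first one strictly greater and remove it.
-- outside the precondition, e.g. on solve(3, 1, [2, 0, 5], [0]): A returns [5], B returns [2]; on solve(2, 1, [1], [0]): A returns [1], B returns [1]; on solve(2, 1, [1, 2], [5]): A raises IndexError, B raises StopIteration
import Mathlib
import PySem

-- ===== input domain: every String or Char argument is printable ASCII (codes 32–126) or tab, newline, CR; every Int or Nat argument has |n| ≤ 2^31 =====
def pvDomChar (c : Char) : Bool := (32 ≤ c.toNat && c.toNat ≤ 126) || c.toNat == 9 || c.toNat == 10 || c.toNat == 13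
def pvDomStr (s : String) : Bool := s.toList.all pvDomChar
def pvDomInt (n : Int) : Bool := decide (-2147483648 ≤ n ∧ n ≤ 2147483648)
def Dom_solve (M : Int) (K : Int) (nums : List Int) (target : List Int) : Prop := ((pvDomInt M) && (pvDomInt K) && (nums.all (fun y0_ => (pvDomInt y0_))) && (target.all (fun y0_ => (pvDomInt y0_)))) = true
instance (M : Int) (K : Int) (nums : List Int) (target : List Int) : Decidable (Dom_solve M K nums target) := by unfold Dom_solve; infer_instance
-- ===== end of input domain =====

-- B replaces A's binary-search + path-compressed union-find over card indices by a
-- plain remaining-cards list scanned for the first value greater than each target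
-- (objective: simpler; not faster).

-- ===== PORT A =====

-- `U[i] = v` assignment; Python raises on an out-of-range index (outside Pre_), the port leaves U unchanged there
def pySetA (U : List Int) (i : Int) (v : Int) : List Int :=
  if 0 ≤ i ∧ i < (U.length : Int) then U.set i.toNat v else U

-- `def index(A, K)` : hand-written binary search (x, y stay ≥ 0, so Nat counters are exact)
def indexGo (A : List Int) (t : Int) (x y : Nat) : Nat :=
  if h : x < y then
    let mid := (x + y) / 2
    if t < (PySem.List.pyGet? A (mid : Int)).getD 0 then
      indexGo A t x mid
    else
      indexGo A t (mid + 1) y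
  else x
termination_by y - x
decreasing_by
  · omega
  · omega

def indexA (A : List Int) (t : Int) : Nat := indexGo A t 0 A.length

-- the `while U[nodes[-1]] != nodes[-1]` loop of `find`; fuel only makes it total
-- (inside Pre_ the chain is strictly increasing, so U.length + 1 steps always suffice);
-- a failing U[...] lookup is Python's IndexError (outside Pre_): the loop result is then unused garbage
def chainGo (U : List Int) (nodes : List Int) (fuel : Nat) : List Int :=
  match fuel with
  | 0 => nodes
  | fuel + 1 =>
    let last := (PySem.List.pyGet? nodes (-1)).getD 0
    match PySem.List.pyGet? U last with
    | none => nodes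
    | some v => if v ≠ last then chainGo U (nodes ++ [v]) fuel else nodes

-- `def find(U, x)` ; returns (result, updated U); (0, U) stands for Python's IndexError (outside Pre_)
def findA (U : List Int) (x : Int) : Int × List Int :=
  match PySem.List.pyGet? U x with
  | none => (0, U)
  | some ux =>
    if ux = x then (ux, U)
    else
      let nodes := chainGo U [x] (U.length + 1)
      let root := (PySem.List.pyGet? nodes (-1)).getD 0
      let U' := nodes.foldl (fun W node => pySetA W node root) U
      ((PySem.List.pyGet? U' x).getD 0, U')

-- the `for k in range(K)` loop of A's solve (n = number of remaining iterations);
-- `.getD 0` stands for Python's IndexError on target[k] / nums[idx] (outside Pre_)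
def solveGo (U : List Int) (nums : List Int) (target : List Int) (k : Nat) (n : Nat) : List Int :=
  match n with
  | 0 => []
  | n + 1 =>
    let t := (PySem.List.pyGet? target (k : Int)).getD 0
    let r := findA U ((indexA nums t : Nat) : Int)
    let v := (PySem.List.pyGet? nums r.1).getD 0
    let U2 := pySetA r.2 r.1 (r.1 + 1)
    v :: solveGo U2 nums target (k + 1) n

def solve (M : Int) (K : Int) (nums : List Int) (target : List Int) : List Int :=
  solveGo (PySem.List.pyRange 0 M 1) nums target 0 K.toNat

-- ===== PORT B =====

-- `next(i for i, v in enumerate(avail) if v > t)` followed by `avail.pop(i)`: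
-- first value > t together with the list without it (none = Python's StopIteration, outside Pre_)
def altPick (avail : List Int) (t : Int) : Option (Int × List Int) :=
  match avail with
  | [] => none
  | v :: rest =>
    if t < v then some (v, rest)
    else
      match altPick rest t with
      | none => none
      | some (x, r) => some (x, v :: r)

-- the `for k in range(K)` loop of B's solve
def altGo (avail : List Int) (target : List Int) (k : Nat) (n : Nat) : List Int :=
  match n with
  | 0 => []
  | n + 1 =>
    let t := (PySem.List.pyGet? target (k : Int)).getD 0
    match altPick avail t with
    | none => []
    | some (v, rest) => v :: altGo rest target (k + 1) n

def solve_alt (M : Int) (K : Int) (nums : List Int) (target : List Int) : List Int :=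
  altGo nums target 0 K.toNat

-- ===== PRECONDITION & SPEC =====
-- With K ≤ 0 the query loop never runs and both programs return [].  Otherwise
-- Pre_ is the function's natural domain (BOJ 16566): nums is the sorted card list and M its
-- length (A's binary search and union-find array are only meaningful there), 0 ≤ K ≤ len(target),
-- and Hall's condition, which holds exactly when every query still finds an unused larger card —
-- outside it A raises IndexError (U[M]) and B raises StopIteration.  On inputs violating the
-- sorted/M-shape A still returns a value, but that value is an accident of binary search on
-- unsorted data / of a union-find array whose size disagrees with the card list.
def Pre_solve (M : Int) (K : Int) (nums : List Int) (target : List Int) : Prop :=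
  K ≤ 0 ∨
  (M = (nums.length : Int) ∧
  List.Pairwise (· ≤ ·) nums ∧
  0 ≤ K ∧ K ≤ (target.length : Int) ∧
  ∀ t ∈ target.take K.toNat,
    (target.take K.toNat).countP (fun s => decide (t ≤ s)) ≤ nums.countP (fun v => decide (t < v)))

instance (M : Int) (K : Int) (nums : List Int) (target : List Int) : Decidable (Pre_solve M K nums target) := by
  unfold Pre_solve; infer_instance

def pvWitness_solve : Int × Int × List Int × List Int := (3, 2, [1, 2, 3], [0, 2])

def Spec_solve (M : Int) (K : Int) (nums : List Int) (target : List Int) (out : List Int) : Prop := out = solve_alt M K nums target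
instance (M : Int) (K : Int) (nums : List Int) (target : List Int) (out : List Int) : Decidable (Spec_solve M K nums target out) := by unfold Spec_solve; infer_instance

-- ===== CLAIM (what is proved, stated in full; the proofs are below) =====
def Claim_equal_solve : Prop := ∀ (M : Int) (K : Int) (nums : List Int) (target : List Int), Dom_solve M K nums target → Pre_solve M K nums target → Spec_solve M K nums target (solve M K nums target)

-- ===== LEMMAS AND PROOFS =====

-- first free index ≥ j (S = free indices, strictly increasing)
def nf (S : List Nat) (j : Nat) : Option Nat := S.find? (fun i => decide (j ≤ i))

-- the union-find invariant: U[i] = i exactly on free indices, and every entry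
-- points forward but not past the next free index
def UFInv (nums : List Int) (U : List Int) (S : List Nat) : Prop :=
  U.length = nums.length ∧
  List.Pairwise (· < ·) S ∧
  (∀ i ∈ S, i < nums.length) ∧
  (∀ i < nums.length, (U.getD i 0 = (i : Int) ↔ i ∈ S)) ∧
  (∀ i < nums.length, (i : Int) ≤ U.getD i 0) ∧
  (∀ i < nums.length, ∀ f, nf S i = some f → U.getD i 0 ≤ (f : Int))

-- nf lemmas

theorem nf_mem {S : List Nat} {j f : Nat} (h : nf S j = some f) : f ∈ S ∧ j ≤ f := by
  unfold nf at h
  refine ⟨List.mem_of_find?_eq_some h, by simpa using List.find?_some h⟩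

theorem nf_self {S : List Nat} (hS : List.Pairwise (· < ·) S) {x : Nat} (hx : x ∈ S) :
    nf S x = some x := by
  induction S with
  | nil => cases hx
  | cons a S ih =>
    rcases List.mem_cons.mp hx with rfl | hx'
    · simp [nf]
    · have ha : a < x := (List.pairwise_cons.mp hS).1 x hx'
      rw [nf, List.find?_cons_of_neg (by simpa using Nat.not_le.mpr ha)]
      exact ih (List.pairwise_cons.mp hS).2 hx'

theorem nf_le_mem {S : List Nat} (hS : List.Pairwise (· < ·) S) {j f : Nat}
    (h : nf S j = some f) : ∀ m ∈ S, j ≤ m → f ≤ m := by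
  induction S with
  | nil => simp [nf] at h  -- nf [] j = none
  | cons a S ih =>
    intro m hm hjm
    by_cases hj : j ≤ a
    · rw [nf, List.find?_cons_of_pos (by simpa using hj)] at h
      cases h
      rcases List.mem_cons.mp hm with rfl | hm'
      · exact le_refl _
      · exact Nat.le_of_lt ((List.pairwise_cons.mp hS).1 m hm')
    · rw [nf, List.find?_cons_of_neg (by simpa using hj)] at h
      rcases List.mem_cons.mp hm with rfl | hm'
      · exact absurd hjm hj
      · exact ih (List.pairwise_cons.mp hS).2 h m hm' hjm

theorem nf_between {S : List Nat} (hS : List.Pairwise (· < ·) S) {j f m : Nat}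
    (h : nf S j = some f) (h1 : j ≤ m) (h2 : m ≤ f) : nf S m = some f := by
  induction S with
  | nil => simp [nf] at h
  | cons a S ih =>
    by_cases hj : j ≤ a
    · rw [nf, List.find?_cons_of_pos (by simpa using hj)] at h
      cases h
      rw [nf, List.find?_cons_of_pos (by simpa using h2)]
    · rw [nf, List.find?_cons_of_neg (by simpa using hj)] at h
      rw [nf, List.find?_cons_of_neg (by simp; omega)]
      exact ih (List.pairwise_cons.mp hS).2 h

theorem nf_exists_of_mem {S : List Nat} (hS : List.Pairwise (· < ·) S) {j m : Nat}
    (hm : m ∈ S) (hjm : j ≤ m) : ∃ f, nf S j = some f ∧ f ≤ m := by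
  have hsome : (S.find? (fun i => decide (j ≤ i))).isSome :=
    List.find?_isSome.mpr ⟨m, hm, by simpa using hjm⟩
  obtain ⟨f, hf⟩ := Option.isSome_iff_exists.mp hsome
  exact ⟨f, hf, nf_le_mem hS hf m hm hjm⟩

theorem pySetA_length (U : List Int) (i v : Int) : (pySetA U i v).length = U.length := by
  unfold pySetA; split <;> simp

theorem getD_pySetA_self (U : List Int) (i : Nat) (v : Int) (h : i < U.length) :
    (pySetA U (i : Int) v).getD i 0 = v := by
  unfold pySetA
  rw [if_pos (by constructor <;> omega)]
  simp [List.getD]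
  rw [List.getElem?_set_self (by simpa using h)]
  simp

theorem getD_pySetA_ne (U : List Int) (i : Int) (j : Nat) (v : Int) (h : (j : Int) ≠ i) :
    (pySetA U i v).getD j 0 = U.getD j 0 := by
  unfold pySetA
  split
  · next hr =>
    simp [List.getD]
    rw [List.getElem?_set_ne (by omega)]
  · rfl

-- compress: foldl of pySetA writes root at every listed (in-range) index
theorem compress_length (nodes : List Int) (U : List Int) (root : Int) :
    (nodes.foldl (fun W node => pySetA W node root) U).length = U.length := by
  induction nodes generalizing U with
  | nil => rfl
  | cons m nodes ih => simp [List.foldl_cons, ih, pySetA_length]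

theorem getD_compress (nodes : List Int) (U : List Int) (root : Int) (i : Nat)
    (hi : i < U.length) :
    (nodes.foldl (fun W node => pySetA W node root) U).getD i 0 =
      if (i : Int) ∈ nodes then root else U.getD i 0 := by
  induction nodes generalizing U with
  | nil => simp
  | cons m nodes ih =>
    rw [List.foldl_cons, ih _ (by rw [pySetA_length]; exact hi)]
    by_cases hmem : (i : Int) ∈ nodes
    · rw [if_pos hmem, if_pos (by simp [hmem])]
    · rw [if_neg hmem]
      by_cases him : (i : Int) = m
      · rw [← him, getD_pySetA_self U i root hi, if_pos (by simp [him])]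
      · rw [getD_pySetA_ne U m i root him, if_neg (by simp [him, hmem])]

theorem getD_mono (nums : List Int) (hs : List.Pairwise (· ≤ ·) nums) {i j : Nat}
    (hij : i ≤ j) (hj : j < nums.length) : nums.getD i 0 ≤ nums.getD j 0 := by
  rcases Nat.eq_or_lt_of_le hij with rfl | hlt
  · exact le_refl _
  · have hi : i < nums.length := Nat.lt_trans hlt hj
    rw [List.getD_eq_getElem nums 0 hi, List.getD_eq_getElem nums 0 hj]
    exact (List.pairwise_iff_getElem.mp hs) i j hi hj hlt

theorem indexGo_inv (nums : List Int) (t : Int) (hs : List.Pairwise (· ≤ ·) nums) :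
    ∀ fuel x y, y - x ≤ fuel → x ≤ y → y ≤ nums.length →
    (∀ i, i < x → i < nums.length → ¬ t < nums.getD i 0) →
    (∀ i, y ≤ i → i < nums.length → t < nums.getD i 0) →
    indexGo nums t x y ≤ nums.length ∧
      (∀ i, i < nums.length → (t < nums.getD i 0 ↔ indexGo nums t x y ≤ i)) := by
  intro fuel
  induction fuel with
  | zero =>
    intro x y hf hxy hylen hlo hhi
    have hxy' : ¬ x < y := by omega
    rw [indexGo, dif_neg hxy']
    have hx : x = y := by omega
    subst hx
    refine ⟨hylen, fun i hi => ?_⟩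
    by_cases hix : x ≤ i
    · exact iff_of_true (hhi i hix hi) hix
    · exact iff_of_false (hlo i (by omega) hi) (by omega)
  | succ fuel ih =>
    intro x y hf hxy hylen hlo hhi
    by_cases h : x < y
    · rw [indexGo, dif_pos h]
      have hmid1 : x ≤ (x + y) / 2 := by omega
      have hmid2 : (x + y) / 2 < y := by omega
      have hmlen : (x + y) / 2 < nums.length := by omega
      simp only []
      rw [PySem.List.pyGet?_natCast, ← List.getD_eq_getElem?_getD]
      by_cases hc : t < nums.getD ((x + y) / 2) 0
      · rw [if_pos hc]
        exact ih x ((x + y) / 2) (by omega) hmid1 (by omega) hlo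
          (fun i hmi hi => lt_of_lt_of_le hc (getD_mono nums hs hmi hi))
      · rw [if_neg hc]
        refine ih ((x + y) / 2 + 1) y (by omega) (by omega) hylen ?_ hhi
        intro i hi hilen hti
        by_cases hix : i < x
        · exact hlo i hix hilen hti
        · exact hc (lt_of_lt_of_le hti (getD_mono nums hs (by omega) hmlen))
    · rw [indexGo, dif_neg h]
      have hx : x = y := by omega
      subst hx
      refine ⟨hylen, fun i hi => ?_⟩
      by_cases hix : x ≤ i
      · exact iff_of_true (hhi i hix hi) hix
      · exact iff_of_false (hlo i (by omega) hi) (by omega)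

theorem indexGo_spec (nums : List Int) (t : Int) (hs : List.Pairwise (· ≤ ·) nums) :
    indexGo nums t 0 nums.length ≤ nums.length ∧
      (∀ i, i < nums.length → (t < nums.getD i 0 ↔ indexGo nums t 0 nums.length ≤ i)) :=
  indexGo_inv nums t hs nums.length 0 nums.length (by omega) (by omega) (le_refl _)
    (by omega) (by omega)


theorem chainGo_step (U : List Int) (pre : List Int) (l v : Int) (fuel : Nat)
    (hv : PySem.List.pyGet? U l = some v) :
    chainGo U (pre ++ [l]) (fuel + 1) =
      if v ≠ l then chainGo U ((pre ++ [l]) ++ [v]) fuel else pre ++ [l] := by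
  rw [chainGo]
  simp only [PySem.List.pyGet?_neg_one_append_singleton, Option.getD_some, hv]

theorem chain_spec (nums U : List Int) (S : List Nat)
    (hlen : U.length = nums.length)
    (hS : List.Pairwise (· < ·) S)
    (hmemS : ∀ i ∈ S, i < nums.length)
    (hiff : ∀ i < nums.length, (U.getD i 0 = (i : Int) ↔ i ∈ S))
    (hlow : ∀ i < nums.length, (i : Int) ≤ U.getD i 0)
    (hupp : ∀ i < nums.length, ∀ f, nf S i = some f → U.getD i 0 ≤ (f : Int)) :
    ∀ fuel (l f : Nat) (pre : List Int), nf S l = some f → f - l < fuel →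
    ∃ ext : List Int,
      chainGo U (pre ++ [(l : Int)]) fuel = (pre ++ [(l : Int)]) ++ ext ∧
      ((pre ++ [(l : Int)]) ++ ext).getLast? = some (f : Int) ∧
      ∀ m ∈ (l : Int) :: ext, ∃ mn : Nat, m = (mn : Int) ∧ nf S mn = some f := by
  intro fuel
  induction fuel with
  | zero =>
    intro l f pre h hfuel
    obtain ⟨hfS, hlf⟩ := nf_mem h
    omega
  | succ fuel ih =>
    intro l f pre h hfuel
    obtain ⟨hfS, hlf⟩ := nf_mem h
    have hflen : f < nums.length := hmemS f hfS
    have hllen : l < U.length := by omega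
    have hget : PySem.List.pyGet? U ((l : Nat) : Int) = some (U.getD l 0) := by
      rw [PySem.List.pyGet?_natCast, List.getElem?_eq_getElem hllen,
        List.getD_eq_getElem U 0 hllen]
    by_cases hfree : U.getD l 0 = (l : Int)
    · have hlS : l ∈ S := (hiff l (by omega)).mp hfree
      have : nf S l = some l := nf_self hS hlS
      have hfl : f = l := by rw [this] at h; exact (Option.some_inj.mp h).symm
      refine ⟨[], ?_, ?_, ?_⟩
      · rw [chainGo_step U pre ((l : Nat) : Int) (U.getD l 0) fuel hget,
          if_neg (not_not_intro hfree)]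
        simp
      · simp [hfl]
      · intro m hm
        simp only [List.mem_singleton] at hm
        exact ⟨l, hm, by rw [this, hfl]⟩
    · have hlv : (l : Int) < U.getD l 0 := lt_of_le_of_ne (hlow l (by omega)) (Ne.symm hfree)
      have hvf : U.getD l 0 ≤ (f : Int) := hupp l (by omega) f h
      set v := U.getD l 0 with hv
      have hv0 : 0 ≤ v := le_trans (by positivity) (le_of_lt hlv)
      have hvn : v = ((v.toNat : Nat) : Int) := (Int.toNat_of_nonneg hv0).symm
      have hlvn : l < v.toNat := by omega
      have hvnf : v.toNat ≤ f := by omega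
      have hnfv : nf S v.toNat = some f := nf_between hS h (by omega) hvnf
      obtain ⟨ext', heq, hlast, hmem⟩ :=
        ih v.toNat f (pre ++ [(l : Int)]) hnfv (by omega)
      refine ⟨v :: ext', ?_, ?_, ?_⟩
      · rw [chainGo_step U pre ((l : Nat) : Int) v fuel hget,
          if_pos (by simpa using hfree)]
        rw [hvn, heq]
        simp [List.append_assoc]
      · rw [hvn]
        have : (pre ++ [(l : Int)]) ++ [((v.toNat : Nat) : Int)] ++ ext' =
            (pre ++ [(l : Int)]) ++ (((v.toNat : Nat) : Int) :: ext') := by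
          simp [List.append_assoc]
        rw [← this]
        exact hlast
      · intro m hm
        rcases List.mem_cons.mp hm with rfl | hm'
        · exact ⟨l, rfl, h⟩
        · rw [hvn] at hm'
          exact hmem m (by simpa using hm')

theorem find_spec (nums U : List Int) (S : List Nat)
    (hInv : UFInv nums U S) (x f : Nat) (h : nf S x = some f) :
    ∃ U', findA U ((x : Nat) : Int) = (((f : Nat) : Int), U') ∧ UFInv nums U' S := by
  obtain ⟨hlen, hS, hmemS, hiff, hlow, hupp⟩ := hInv
  obtain ⟨hfS, hxf⟩ := nf_mem h
  have hflen : f < nums.length := hmemS f hfS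
  have hxlen : x < U.length := by omega
  have hget : PySem.List.pyGet? U ((x : Nat) : Int) = some (U.getD x 0) := by
    rw [PySem.List.pyGet?_natCast, List.getElem?_eq_getElem hxlen,
      List.getD_eq_getElem U 0 hxlen]
  by_cases hfree : U.getD x 0 = (x : Int)
  · have hxS : x ∈ S := (hiff x (by omega)).mp hfree
    have hfx : f = x := by
      have := nf_self hS hxS
      rw [this] at h; exact (Option.some_inj.mp h).symm
    refine ⟨U, ?_, hlen, hS, hmemS, hiff, hlow, hupp⟩
    have hfreeO : U[x]?.getD 0 = ((x : Nat) : Int) := by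
      rw [List.getElem?_eq_getElem hxlen, ← List.getD_eq_getElem U 0 hxlen]; exact hfree
    rw [findA, hget]
    simp [hfreeO, hfx]
  · obtain ⟨ext, heq, hlast, hmem⟩ :=
      chain_spec nums U S hlen hS hmemS hiff hlow hupp (U.length + 1) x f [] h (by omega)
    rw [List.nil_append] at heq hlast
    have hnodes : chainGo U [(x : Int)] (U.length + 1) = (x : Int) :: ext := by
      rw [heq]; simp
    have hmem' : ∀ m ∈ (x : Int) :: ext, ∃ mn : Nat, m = (mn : Int) ∧ nf S mn = some f := hmem
    have hroot : (PySem.List.pyGet? ((x : Int) :: ext) (-1)).getD 0 = (f : Int) := by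
      rw [PySem.List.pyGet?_neg_one]
      have hl2 : ((x : Int) :: ext).getLast? = some ((f : Nat) : Int) := by simpa using hlast
      rw [hl2]; rfl
    set U' := ((x : Int) :: ext).foldl (fun W node => pySetA W node (f : Int)) U with hU'
    have hlen' : U'.length = U.length := compress_length _ _ _
    have hgetD' : ∀ i : Nat, i < U.length →
        U'.getD i 0 = if (i : Int) ∈ (x : Int) :: ext then (f : Int) else U.getD i 0 :=
      fun i hi => getD_compress _ _ _ i hi
    have hxmem : (x : Int) ∈ (x : Int) :: ext := List.mem_cons_self
    have hU'x : U'.getD x 0 = (f : Int) := by rw [hgetD' x hxlen, if_pos hxmem]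
    refine ⟨U', ?_, ?_⟩
    · rw [findA, hget]
      simp only []
      rw [if_neg hfree]
      simp only [hnodes, hroot, ← hU']
      have : PySem.List.pyGet? U' ((x : Nat) : Int) = some (U'.getD x 0) := by
        rw [PySem.List.pyGet?_natCast, List.getElem?_eq_getElem (show x < U'.length by omega),
          List.getD_eq_getElem U' 0 (show x < U'.length by omega)]
      rw [this, hU'x]
      rfl
    · refine ⟨by omega, hS, hmemS, ?_, ?_, ?_⟩
      · intro i hi
        rw [hgetD' i (by omega)]
        by_cases hin : (i : Int) ∈ (x : Int) :: ext
        · rw [if_pos hin]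
          obtain ⟨mn, hmn, hnfi⟩ := hmem' _ hin
          have : i = mn := by exact_mod_cast hmn
          subst this
          constructor
          · intro hfi
            have : f = i := by exact_mod_cast hfi
            rw [← this]; exact hfS
          · intro hiS
            have := nf_self hS hiS
            rw [this] at hnfi
            exact_mod_cast (Option.some_inj.mp hnfi).symm
        · rw [if_neg hin]; exact hiff i hi
      · intro i hi
        rw [hgetD' i (by omega)]
        by_cases hin : (i : Int) ∈ (x : Int) :: ext
        · rw [if_pos hin]
          obtain ⟨mn, hmn, hnfi⟩ := hmem' _ hin
          have hieq : i = mn := by exact_mod_cast hmn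
          subst hieq
          exact_mod_cast (nf_mem hnfi).2
        · rw [if_neg hin]; exact hlow i hi
      · intro i hi f' hf'
        rw [hgetD' i (by omega)]
        by_cases hin : (i : Int) ∈ (x : Int) :: ext
        · rw [if_pos hin]
          obtain ⟨mn, hmn, hnfi⟩ := hmem' _ hin
          have hieq : i = mn := by exact_mod_cast hmn
          subst hieq
          rw [hnfi] at hf'
          rw [Option.some_inj.mp hf']
        · rw [if_neg hin]; exact hupp i hi f' hf'

theorem UFInv_erase (nums U : List Int) (S : List Nat) (hInv : UFInv nums U S)
    (f : Nat) (hfS : f ∈ S) :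
    UFInv nums (pySetA U ((f : Nat) : Int) (((f : Nat) : Int) + 1)) (S.erase f) := by
  obtain ⟨hlen, hS, hmemS, hiff, hlow, hupp⟩ := hInv
  have hnd : S.Nodup := hS.imp Nat.ne_of_lt
  have hflen : f < nums.length := hmemS f hfS
  have hget2 : ∀ i : Nat, i < nums.length →
      (pySetA U ((f : Nat) : Int) (((f : Nat) : Int) + 1)).getD i 0 =
        if i = f then ((f : Nat) : Int) + 1 else U.getD i 0 := by
    intro i hi
    by_cases hif : i = f
    · subst hif; rw [if_pos rfl, getD_pySetA_self U i _ (by omega)]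
    · rw [if_neg hif, getD_pySetA_ne U _ i _ (by exact_mod_cast hif)]
  refine ⟨by rw [pySetA_length]; exact hlen,
    List.Pairwise.sublist List.erase_sublist hS,
    fun i hi => hmemS i (List.mem_of_mem_erase hi), ?_, ?_, ?_⟩
  · intro i hi
    rw [hget2 i hi, hnd.mem_erase_iff]
    by_cases hif : i = f
    · subst hif
      rw [if_pos rfl]
      constructor
      · intro hcon; omega
      · intro hcon; exact absurd rfl hcon.1
    · rw [if_neg hif]
      rw [hiff i hi]
      exact ⟨fun h => ⟨hif, h⟩, fun h => h.2⟩
  · intro i hi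
    rw [hget2 i hi]
    by_cases hif : i = f
    · subst hif; rw [if_pos rfl]; omega
    · rw [if_neg hif]; exact hlow i hi
  · intro i hi f' hf'
    obtain ⟨hf'mem, hif'⟩ := nf_mem hf'
    have hf'S : f' ∈ S := List.mem_of_mem_erase hf'mem
    have hf'ne : f' ≠ f := ((hnd.mem_erase_iff).mp hf'mem).1
    rw [hget2 i hi]
    by_cases hif : i = f
    · subst hif; rw [if_pos rfl]
      omega
    · rw [if_neg hif]
      obtain ⟨g, hg, hgle⟩ := nf_exists_of_mem hS hf'S hif'
      exact le_trans (hupp i hi g hg) (by exact_mod_cast hgle)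

theorem countP_perm_erase (S : List Nat) (f : Nat) (hf : f ∈ S) (q : Nat → Bool) :
    S.countP q = (if q f then 1 else 0) + (S.erase f).countP q := by
  rw [(List.perm_cons_erase hf).countP_congr (fun x _ => rfl), List.countP_cons]
  split <;> omega

theorem map_getD_range (l : List Int) :
    (List.range l.length).map (fun i => l.getD i 0) = l := by
  apply List.ext_getElem <;> simp
  intro i hi _
  rw [List.getElem?_eq_getElem hi]
  rfl

theorem altPick_spec (nums : List Int) (t : Int) (r : Nat)
    (hr : ∀ i, i < nums.length → (t < nums.getD i 0 ↔ r ≤ i)) :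
    ∀ S : List Nat, List.Pairwise (· < ·) S → (∀ i ∈ S, i < nums.length) →
    ∀ f, nf S r = some f →
    altPick (S.map (fun i => nums.getD i 0)) t =
      some (nums.getD f 0, (S.erase f).map (fun i => nums.getD i 0)) := by
  intro S
  induction S with
  | nil => intro _ _ f hf; simp [nf] at hf
  | cons a S ih =>
    intro hS hmem f hf
    simp only [List.map_cons, altPick]
    by_cases hta : t < nums.getD a 0
    · have hra : r ≤ a := (hr a (hmem a List.mem_cons_self)).mp hta
      rw [nf, List.find?_cons_of_pos (by simpa using hra)] at hf
      cases hf
      rw [if_pos hta, List.erase_cons_head]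
    · have hra : a < r := by
        by_contra hcon
        exact hta ((hr a (hmem a List.mem_cons_self)).mpr (by omega))
      rw [nf, List.find?_cons_of_neg (by simpa using Nat.not_le.mpr hra)] at hf
      have hfa : f ≠ a := by
        have := (nf_mem hf).2
        omega
      rw [if_neg hta,
        ih (List.pairwise_cons.mp hS).2 (fun i hi => hmem i (List.mem_cons_of_mem a hi)) f hf]
      rw [List.erase_cons_tail (by simp [Ne.symm hfa])]
      rfl

theorem sim (nums target : List Int) (hs : List.Pairwise (· ≤ ·) nums) :
    ∀ (n k : Nat) (U : List Int) (S : List Nat), UFInv nums U S →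
    k + n ≤ target.length →
    (∀ t ∈ (target.drop k).take n,
      ((target.drop k).take n).countP (fun s => decide (t ≤ s)) ≤
        S.countP (fun i => decide (t < nums.getD i 0))) →
    solveGo U nums target k n = altGo (S.map (fun i => nums.getD i 0)) target k n := by
  intro n
  induction n with
  | zero => intro k U S _ _ _; rfl
  | succ n ih =>
    intro k U S hInv hklen hHall
    have hInv' := hInv
    obtain ⟨hlen, hS, hmemS, hiff, hlow, hupp⟩ := hInv'
    have hk : k < target.length := by omega
    have hdrop : target.drop k = target[k] :: target.drop (k + 1) := List.drop_eq_getElem_cons hk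
    set t := target[k] with ht
    have hrem : (target.drop k).take (n + 1) = t :: (target.drop (k + 1)).take n := by
      rw [hdrop, List.take_succ_cons]
    have htget : PySem.List.pyGet? target ((k : Nat) : Int) = some t := by
      rw [PySem.List.pyGet?_natCast, List.getElem?_eq_getElem hk]
    obtain ⟨hrlen, hr⟩ := indexGo_spec nums t hs
    set r := indexGo nums t 0 nums.length with hrdef
    have htmem : t ∈ (target.drop k).take (n + 1) := by rw [hrem]; exact List.mem_cons_self
    have h1 : 1 ≤ ((target.drop k).take (n + 1)).countP (fun s => decide (t ≤ s)) := by
      rw [hrem, List.countP_cons]; simp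
    have h2 : 0 < S.countP (fun i => decide (t < nums.getD i 0)) :=
      lt_of_lt_of_le (by omega) (le_trans h1 (hHall t htmem))
    obtain ⟨i₀, hi₀S, hi₀p⟩ := List.countP_pos_iff.mp h2
    have hi₀ : t < nums.getD i₀ 0 := by simpa using hi₀p
    have hri₀ : r ≤ i₀ := (hr i₀ (hmemS i₀ hi₀S)).mp hi₀
    obtain ⟨f, hnf, _⟩ := nf_exists_of_mem hS hi₀S hri₀
    have hfS : f ∈ S := (nf_mem hnf).1
    have hrf : r ≤ f := (nf_mem hnf).2
    have hflen : f < nums.length := hmemS f hfS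
    have htgf : t < nums.getD f 0 := (hr f hflen).mpr hrf
    obtain ⟨U₁, hfind, hInv₁⟩ := find_spec nums U S hInv r f hnf
    have hval : (PySem.List.pyGet? nums ((f : Nat) : Int)).getD 0 = nums.getD f 0 := by
      rw [PySem.List.pyGet?_natCast, List.getElem?_eq_getElem hflen,
        List.getD_eq_getElem nums 0 hflen]
      rfl
    -- Hall condition is preserved by removing the picked card
    have hall' : ∀ t' ∈ (target.drop (k + 1)).take n,
        ((target.drop (k + 1)).take n).countP (fun s => decide (t' ≤ s)) ≤
          (S.erase f).countP (fun i => decide (t' < nums.getD i 0)) := by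
      intro t' ht'
      have ht'rem : t' ∈ (target.drop k).take (n + 1) := by
        rw [hrem]; exact List.mem_cons_of_mem _ ht'
      have hh := hHall t' ht'rem
      rw [hrem, List.countP_cons] at hh
      have hsplit := countP_perm_erase S f hfS (fun i => decide (t' < nums.getD i 0))
      by_cases hc1 : t' ≤ t
      · have hgf : t' < nums.getD f 0 := lt_of_le_of_lt hc1 htgf
        rw [if_pos (by simpa using hc1)] at hh
        rw [if_pos (by simpa using hgf)] at hsplit
        omega
      · have htt' : t < t' := by omega
        by_cases hc2 : t' < nums.getD f 0
        · have hcongr : S.countP (fun i => decide (t < nums.getD i 0)) =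
              S.countP (fun i => decide (t' < nums.getD i 0)) := by
            apply List.countP_congr
            intro i hiS
            simp only [decide_eq_true_eq]
            constructor
            · intro hgi
              have hfi : f ≤ i := nf_le_mem hS hnf i hiS ((hr i (hmemS i hiS)).mp hgi)
              exact lt_of_lt_of_le hc2 (getD_mono nums hs hfi (hmemS i hiS))
            · intro hgi
              exact lt_trans htt' hgi
          have hmono : ((target.drop (k + 1)).take n).countP (fun s => decide (t' ≤ s)) ≤
              ((target.drop (k + 1)).take n).countP (fun s => decide (t ≤ s)) := by
            apply List.countP_mono_left
            intro a _ hd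
            simp only [decide_eq_true_eq] at hd ⊢
            omega
          have hht := hHall t htmem
          rw [hrem, List.countP_cons, if_pos (by simp)] at hht
          rw [if_pos (by simpa using hc2)] at hsplit
          rw [hcongr] at hht
          omega
        · rw [if_neg (by simpa using hc1)] at hh
          rw [if_neg (by simpa using hc2)] at hsplit
          omega
    -- one step of both programs
    rw [solveGo, altGo]
    simp only [htget, Option.getD_some, indexA, ← hrdef, hfind,
      altPick_spec nums t r hr S hS hmemS f hnf, hval]
    rw [ih (k + 1) (pySetA U₁ ((f : Nat) : Int) (((f : Nat) : Int) + 1)) (S.erase f)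
      (UFInv_erase nums U₁ S hInv₁ f hfS) (by omega) hall']

theorem countP_range_getD (nums : List Int) (q : Int → Bool) :
    (List.range nums.length).countP (fun i => q (nums.getD i 0)) = nums.countP q := by
  conv_rhs => rw [← map_getD_range nums]
  rw [List.countP_map]
  rfl

theorem UFInv_init (nums : List Int) :
    UFInv nums (PySem.List.pyRange 0 (nums.length : Int) 1) (List.range nums.length) := by
  have hlen : (PySem.List.pyRange 0 (nums.length : Int) 1).length = nums.length := by
    rw [PySem.List.length_pyRange_one]; omega
  have hg : ∀ i : Nat, i < nums.length →
      (PySem.List.pyRange 0 (nums.length : Int) 1).getD i 0 = (i : Int) := by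
    intro i hi
    rw [List.getD_eq_getElem _ 0 (by omega), PySem.List.getElem_pyRange_one]
    omega
  refine ⟨hlen, List.pairwise_lt_range, fun i hi => List.mem_range.mp hi, ?_, ?_, ?_⟩
  · intro i hi
    rw [hg i hi]
    simp [List.mem_range, hi]
  · intro i hi
    rw [hg i hi]
  · intro i hi f hf
    rw [hg i hi]
    exact_mod_cast (nf_mem hf).2

theorem solve_spec : Claim_equal_solve := by
  intro M K nums target hDom hPre
  rcases hPre with hK | ⟨hM, hs, hK0, hKlen, hHall⟩
  · unfold Spec_solve solve solve_alt
    rw [Int.toNat_eq_zero.mpr hK]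
    rfl
  unfold Spec_solve solve solve_alt
  rw [hM]
  have hall0 : ∀ t ∈ (target.drop 0).take K.toNat,
      ((target.drop 0).take K.toNat).countP (fun s => decide (t ≤ s)) ≤
        (List.range nums.length).countP (fun i => decide (t < nums.getD i 0)) := by
    intro t ht
    rw [List.drop_zero] at ht ⊢
    calc (target.take K.toNat).countP (fun s => decide (t ≤ s))
        ≤ nums.countP (fun v => decide (t < v)) := hHall t ht
      _ = (List.range nums.length).countP (fun i => decide (t < nums.getD i 0)) :=
          (countP_range_getD nums (fun v => decide (t < v))).symm
  have hsim := sim nums target hs K.toNat 0 (PySem.List.pyRange 0 (nums.length : Int) 1)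
    (List.range nums.length) (UFInv_init nums) (by omega) hall0
  rw [map_getD_range] at hsim
  exact hsim
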